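-- pv_equiv track=rewrite | github.com/dusdnKR/algorithm-solving | 프로그래머스/lv2/131704. 택배상자/택배상자.py | solution
-- ===== SOURCE A (Python) =====
-- def solution(order):
--     answer = 0
--     subContainer = []
--     box = 1
--
--     for box in range(1, len(order)+1):
--         subContainer.append(box)
--         while subContainer and subContainer[-1] == order[answer]:
--             del subContainer[-1]
--             answer += 1
--
--     return answer
-- ===== SOURCE B (Python) =====
-- def solution(order):
--     stack = []
--     next_box = 1
--     n = len(order)
--     answer = 0
--     for target in order:
--         while next_box <= target and next_box <= n:
--             stack.append(next_box)
--             next_box += 1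
--         if stack and stack[-1] == target:
--             stack.pop()
--             answer += 1
--         else:
--             break
--     return answer
-- ===== Notes on version B (the rewrite author's own statement) =====
-- stated objective: alternative
-- what changed: B iterates over the requested delivery order (filling the stack up to each target on demand and stopping at the first unservable target) instead of A's loop over incoming boxes with an inner pop-while; B terminates early where A keeps scanning remaining boxes.
import Mathlib
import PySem

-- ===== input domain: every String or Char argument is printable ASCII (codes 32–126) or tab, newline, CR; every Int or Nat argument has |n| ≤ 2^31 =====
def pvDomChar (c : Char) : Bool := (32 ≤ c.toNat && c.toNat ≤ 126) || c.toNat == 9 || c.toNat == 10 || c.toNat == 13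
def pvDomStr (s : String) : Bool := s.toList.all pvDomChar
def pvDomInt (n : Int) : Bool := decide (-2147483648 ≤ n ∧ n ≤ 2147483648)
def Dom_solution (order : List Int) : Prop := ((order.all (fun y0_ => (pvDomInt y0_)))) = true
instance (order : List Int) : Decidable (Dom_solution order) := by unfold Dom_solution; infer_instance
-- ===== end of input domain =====

-- B iterates over the requested order, filling the stack on demand and stopping at the
-- first unservable target, instead of A's loop over incoming boxes with an inner pop-while.
-- (Proved equivalent for all inputs; B mutates only its own locals, like A.)

-- ===== PORT A =====
-- inner 'while subContainer and subContainer[-1] == order[answer]' loop; the stack is kept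
-- head-first (head = Python's subContainer[-1]).  Python's order[answer] can in principle
-- raise IndexError, but answer < len(order) whenever the stack is nonempty (pops ≤ pushes),
-- so the 'none' branch below is unreachable and the port is exact.
def popWhileA (order : List Int) : List Int → Int → List Int × Int
  | [], a => ([], a)
  | top :: rest, a =>
    if PySem.List.pyGet? order a = some top then popWhileA order rest (a + 1)
    else (top :: rest, a)

def solution (order : List Int) : Int :=
  ((PySem.List.pyRange 1 ((order.length : Int) + 1) 1).foldl
    (fun s b => popWhileA order (b :: s.1) s.2) ([], 0)).2

-- ===== PORT B =====
-- 'while next_box <= target and next_box <= n: stack.append(next_box); next_box += 1'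
def fillB (t n : Int) (st : List Int) (next : Int) : List Int × Int :=
  if next ≤ t ∧ next ≤ n then fillB t n (next :: st) (next + 1) else (st, next)
termination_by (min t n + 1 - next).toNat
decreasing_by omega

-- 'for target in order: … else: break'; the break is the non-recursive branches.
def goB (n : Int) : List Int → List Int → Int → Int → Int
  | [], _, _, a => a
  | t :: ts, st, next, a =>
    if (fillB t n st next).1.head? = some t then
      goB n ts (fillB t n st next).1.tail (fillB t n st next).2 (a + 1)
    else a

def solution_alt (order : List Int) : Int :=
  goB (order.length : Int) order [] 1 0

-- ===== PRECONDITION & SPEC =====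
def Spec_solution (order : List Int) (out : Int) : Prop := out = solution_alt order
instance (order : List Int) (out : Int) : Decidable (Spec_solution order out) := by unfold Spec_solution; infer_instance

-- ===== CLAIM (what is proved, stated in full; the proofs are below) =====
def Claim_equal_solution : Prop := ∀ (order : List Int), Dom_solution order → Spec_solution order (solution order)

-- ===== LEMMAS AND PROOFS =====

-- A's outer loop, recast as recursion on the remaining boxes (proof helper).
def runA (order : List Int) (st : List Int) (next a : Int) : Int :=
  if h : next ≤ (order.length : Int) then
    runA order (popWhileA order (next :: st) a).1 (next + 1) (popWhileA order (next :: st) a).2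
  else a
termination_by ((order.length : Int) + 1 - next).toNat
decreasing_by omega

-- the foldl in the port of A computes runA
theorem foldl_eq_runA (order : List Int) (next : Int) (st : List Int) (a : Int) :
    ((PySem.List.pyRange next ((order.length : Int) + 1) 1).foldl
      (fun s b => popWhileA order (b :: s.1) s.2) (st, a)).2 = runA order st next a := by
  rw [runA]
  split
  · next h =>
    rw [PySem.List.pyRange_one_cons (by omega), List.foldl_cons]
    exact foldl_eq_runA order (next + 1) _ _
  · next h =>
    rw [PySem.List.pyRange_one_eq_nil (by omega), List.foldl_nil]
termination_by ((order.length : Int) + 1 - next).toNat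
decreasing_by omega

theorem popA_le (order st : List Int) (a : Int) : a ≤ (popWhileA order st a).2 := by
  induction st generalizing a with
  | nil => simp [popWhileA]
  | cons top rest ih =>
    simp only [popWhileA]
    split
    · exact le_trans (by omega) (ih (a + 1))
    · simp

theorem popA_len (order st : List Int) (a : Int) :
    ((popWhileA order st a).1.length : Int) + (popWhileA order st a).2
      = (st.length : Int) + a := by
  induction st generalizing a with
  | nil => simp [popWhileA]
  | cons top rest ih =>
    simp only [popWhileA]
    split
    · rw [ih (a + 1)]; simp only [List.length_cons]; push_cast; ring
    · simp

theorem popA_sub (order st : List Int) (a : Int) :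
    ∀ x ∈ (popWhileA order st a).1, x ∈ st := by
  induction st generalizing a with
  | nil => simp [popWhileA]
  | cons top rest ih =>
    simp only [popWhileA]
    split
    · intro x hx; exact List.mem_cons_of_mem _ (ih (a + 1) x hx)
    · intro x hx; exact hx

-- the stopping condition of the while loop
def QuiesA (order st : List Int) (a : Int) : Prop :=
  match st with
  | [] => True
  | top :: _ => PySem.List.pyGet? order a ≠ some top

theorem popA_quies (order st : List Int) (a : Int) :
    QuiesA order (popWhileA order st a).1 (popWhileA order st a).2 := by
  induction st generalizing a with
  | nil => simp [popWhileA, QuiesA]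
  | cons top rest ih =>
    simp only [popWhileA]
    split
    · exact ih (a + 1)
    · next h => exact h

-- a non-quiescent state makes B pop exactly as A's while loop does
theorem goB_pop (order st : List Int) (next a : Int) (ha : 0 ≤ a)
    (hm : ∀ x ∈ st, x < next) :
    goB (order.length : Int) (order.drop a.toNat) st next a
      = goB (order.length : Int) (order.drop (popWhileA order st a).2.toNat)
          (popWhileA order st a).1 next (popWhileA order st a).2 := by
  induction st generalizing a with
  | nil => simp [popWhileA]
  | cons top rest ih =>
    simp only [popWhileA]
    split
    · next hEq =>
      -- the index is in range and order[a] = top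
      rw [PySem.List.pyGet?_of_nonneg order ha] at hEq
      have hrange : a.toNat < order.length := (List.getElem?_eq_some_iff.mp hEq).1
      have hget : order[a.toNat] = top := by
        simpa [List.getElem?_eq_getElem hrange] using hEq
      have hdrop : order.drop a.toNat = top :: order.drop (a.toNat + 1) := by
        rw [List.drop_eq_getElem_cons hrange, hget]
      rw [hdrop]
      have hf : fillB top (order.length : Int) (top :: rest) next = (top :: rest, next) := by
        rw [fillB]
        rw [if_neg (by have := hm top (by simp); omega)]
      simp only [goB, hf, List.head?_cons, List.tail_cons, if_true]
      have htn : (a + 1).toNat = a.toNat + 1 := by omega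
      have := ih (a + 1) (by omega) (fun x hx => hm x (List.mem_cons_of_mem _ hx))
      rw [htn] at this
      exact this
    · rfl

-- main simulation: from any quiescent state the two loops agree
theorem runA_eq_goB (order : List Int) (next : Int) (st : List Int) (a : Int)
    (ha : 0 ≤ a) (hlen : (st.length : Int) = next - 1 - a)
    (hm : ∀ x ∈ st, x < next) (hub : next ≤ (order.length : Int) + 1)
    (hq : QuiesA order st a) :
    runA order st next a = goB (order.length : Int) (order.drop a.toNat) st next a := by
  rw [runA]
  split
  · next hle =>
    -- invariants for the recursive call
    have han : a < (order.length : Int) := by omega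
    have hrange : a.toNat < order.length := by omega
    have hdrop : order.drop a.toNat
        = order[a.toNat] :: order.drop (a.toNat + 1) :=
      List.drop_eq_getElem_cons hrange
    have hgeta : PySem.List.pyGet? order a = some order[a.toNat] := by
      rw [PySem.List.pyGet?_of_nonneg order ha, List.getElem?_eq_getElem hrange]
    set t := order[a.toNat] with ht
    set P := popWhileA order (next :: st) a with hP
    have hP2 : a ≤ P.2 := popA_le order _ a
    have hPlen : ((P.1.length : Int)) + P.2 = (st.length : Int) + 1 + a := by
      have := popA_len order (next :: st) a; simpa using this
    have hPm : ∀ x ∈ P.1, x < next + 1 := by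
      intro x hx
      rcases List.mem_cons.mp (popA_sub order (next :: st) a x hx) with h | h
      · omega
      · exact lt_trans (hm x h) (by omega)
    have hIH := runA_eq_goB order (next + 1) P.1 P.2 (by omega)
      (by omega) hPm (by omega) (popA_quies order (next :: st) a)
    rw [hIH]
    -- now show the B side takes the same step(s)
    have hunf : popWhileA order (next :: st) a
        = if PySem.List.pyGet? order a = some next then popWhileA order st (a + 1)
          else (next :: st, a) := by simp [popWhileA]
    by_cases hteq : t = next
    · -- box `next` is the next target: A pops it (maybe cascading); B fills to t and pops
      have hPval : P = popWhileA order st (a + 1) := by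
        rw [hP, hunf, if_pos (by rw [hgeta, hteq])]
      rw [hdrop]
      have hf : fillB t (order.length : Int) st next = (next :: st, next + 1) := by
        rw [fillB]
        rw [if_pos ⟨by omega, hle⟩]
        rw [fillB]
        rw [if_neg (by omega)]
      simp only [goB, hf, List.head?_cons, List.tail_cons]
      rw [if_pos (by rw [hteq])]
      have hpop := goB_pop order st (next + 1) (a + 1) (by omega)
        (fun x hx => lt_trans (hm x hx) (by omega))
      have htn : (a + 1).toNat = a.toNat + 1 := by omega
      rw [htn] at hpop
      rw [hpop, hPval]
    · -- box `next` is not the next target: A just pushes it; B's fill absorbs it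
      have hPval : P = (next :: st, a) := by
        rw [hP, hunf, if_neg (by rw [hgeta]; intro hc; exact hteq (by injection hc))]
      rw [hPval, hdrop]
      by_cases hlt : next ≤ t
      · -- fill from next and fill from next+1 after pushing `next` coincide
        have hfe : fillB t (order.length : Int) st next
            = fillB t (order.length : Int) (next :: st) (next + 1) := by
          rw [fillB]
          rw [if_pos ⟨hlt, hle⟩]
        simp only [goB, hfe]
      · -- t < next: fill is a no-op on both sides and neither top matches t
        have hf1 : fillB t (order.length : Int) st next = (st, next) := by
          rw [fillB]; rw [if_neg (by omega)]
        have hf2 : fillB t (order.length : Int) (next :: st) (next + 1)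
            = (next :: st, next + 1) := by
          rw [fillB]; rw [if_neg (by omega)]
        simp only [goB, hf1, hf2, List.head?_cons]
        rw [if_neg (by simp; omega)]
        rcases st with _ | ⟨top, rest⟩
        · simp
        · have htop : ¬ (top = t) := by
            intro hc; exact hq (by rw [hgeta, hc])
          simp only [List.head?_cons]
          rw [if_neg (by simpa using htop)]
  · next hgt =>
    -- no boxes left on A's side; B cannot serve anything more either
    by_cases han : a.toNat < order.length
    · have hdrop : order.drop a.toNat
          = order[a.toNat] :: order.drop (a.toNat + 1) :=
        List.drop_eq_getElem_cons han
      rw [hdrop]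
      have hf : fillB order[a.toNat] (order.length : Int) st next = (st, next) := by
        rw [fillB]; rw [if_neg (by omega)]
      simp only [goB, hf]
      rcases st with _ | ⟨top, rest⟩
      · simp
      · have hgeta : PySem.List.pyGet? order a = some order[a.toNat] := by
          rw [PySem.List.pyGet?_of_nonneg order ha, List.getElem?_eq_getElem han]
        have htop : ¬ (top = order[a.toNat]) := by
          intro hc; exact hq (by rw [hgeta, hc])
        simp only [List.head?_cons]
        rw [if_neg (by simpa using htop)]
    · rw [List.drop_eq_nil_of_le (by omega)]
      rfl
termination_by ((order.length : Int) + 1 - next).toNat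
decreasing_by omega

-- ===== VERDICT (by name: the statement is the Claim_ definition above) =====
theorem solution_spec : Claim_equal_solution := by
  intro order _
  show solution order = solution_alt order
  unfold solution solution_alt
  rw [foldl_eq_runA]
  have := runA_eq_goB order 1 [] 0 le_rfl (by simp) (by simp)
    (by omega) trivial
  simpa using this
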